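-- pv_equiv track=rewrite | github.com/mumuvrf/Academia-Python | Aula 09/que_lingua_e_essa.py | separa_palavras
-- ===== SOURCE A (Python) =====
-- def separa_palavras(texto):
--     pontuacoes = ['!', '?', ',', ';', '.', ':', ')', '}', ']', '(', '[', '{']
--     palavras = []
--     palavra_atual = ''
--     for letra in texto:
--         if letra == ' ' or letra == '\n':
--             if palavra_atual != '':
--                 palavras.append(palavra_atual)
--                 palavra_atual = ''
--         elif letra not in pontuacoes and letra != ' ':
--             palavra_atual += letra
--     if palavra_atual != '': palavras.append(palavra_atual.strip('\n'))
--     return palavras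
-- ===== SOURCE B (Python) =====
-- def separa_palavras(texto):
--     pontuacoes = ['!', '?', ',', ';', '.', ':', ')', '}', ']', '(', '[', '{']
--     limpo = ''.join(c for c in texto if c not in pontuacoes)
--     return [p for p in limpo.replace('\n', ' ').split(' ') if p != '']
-- ===== Notes on version B (the rewrite author's own statement) =====
-- stated objective: simpler
-- what changed: Replaced A's single accumulate-and-emit character loop (with its trailing flush and strip) by two shaped passes: a comprehension that drops punctuation characters, then a split on space/newline with empty tokens removed.
import Mathlib
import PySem

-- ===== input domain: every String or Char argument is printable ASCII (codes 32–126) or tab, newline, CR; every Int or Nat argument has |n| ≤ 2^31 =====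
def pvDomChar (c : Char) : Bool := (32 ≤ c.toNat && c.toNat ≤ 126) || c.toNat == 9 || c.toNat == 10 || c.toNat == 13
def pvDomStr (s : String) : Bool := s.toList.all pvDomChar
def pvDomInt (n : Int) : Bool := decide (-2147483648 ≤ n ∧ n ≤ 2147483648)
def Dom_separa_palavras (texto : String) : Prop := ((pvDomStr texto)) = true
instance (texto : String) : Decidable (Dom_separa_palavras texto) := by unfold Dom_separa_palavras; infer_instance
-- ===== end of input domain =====

-- B replaces A's single accumulate-and-emit character loop by two passes — filter out punctuation,
-- then split on space/newline and drop empty tokens — for a simpler decomposition (same cost).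

-- ===== PORT A =====
def pvPunct : List Char := ['!', '?', ',', ';', '.', ':', ')', '}', ']', '(', '[', '{']

-- one step of A's `for letra in texto` loop; state = (palavras, palavra_atual as a char list)
def pvStepA (st : List String × List Char) (letra : Char) : List String × List Char :=
  if letra = ' ' ∨ letra = '\n' then
    if st.2 ≠ [] then (st.1 ++ [String.ofList st.2], []) else st
  else if letra ∉ pvPunct ∧ letra ≠ ' ' then (st.1, st.2 ++ [letra])
  else st

-- A's trailing `if palavra_atual != '': palavras.append(palavra_atual.strip('\n'))`
def pvFinishA (st : List String × List Char) : List String :=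
  if st.2 ≠ [] then st.1 ++ [String.ofList (PySem.Chars.stripChars st.2 ['\n'])] else st.1

def separa_palavras (texto : String) : List String :=
  pvFinishA (texto.toList.foldl pvStepA ([], []))

-- ===== PORT B =====
def separa_palavras_alt (texto : String) : List String :=
  let limpo := texto.toList.filter (fun c => !pvPunct.contains c)
  let tokens := (limpo.map (fun c => if c = '\n' then ' ' else c)).splitOn ' '
  (tokens.map String.ofList).filter (fun p => p ≠ "")

-- ===== PRECONDITION & SPEC =====
def Spec_separa_palavras (texto : String) (out : List String) : Prop := out = separa_palavras_alt texto
instance (texto : String) (out : List String) : Decidable (Spec_separa_palavras texto out) := by unfold Spec_separa_palavras; infer_instance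

-- ===== CLAIM (what is proved, stated in full; the proofs are below) =====
def Claim_equal_separa_palavras : Prop := ∀ (texto : String), Dom_separa_palavras texto → Spec_separa_palavras texto (separa_palavras texto)

-- ===== LEMMAS AND PROOFS =====

theorem pvOfList_eq_empty_iff (l : List Char) : String.ofList l = "" ↔ l = [] := by
  constructor
  · intro h
    have := congrArg String.toList h
    simpa using this
  · rintro rfl; rfl

theorem pvDropWhile_no_nl (l : List Char) (h : '\n' ∉ l) :
    l.dropWhile (fun c => (['\n'] : List Char).contains c) = l := by
  cases l with
  | nil => rfl
  | cons a t =>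
    have ha : a ≠ '\n' := by intro hh; exact h (by simp [hh])
    simp [List.dropWhile, ha]

theorem pvStrip_no_nl (l : List Char) (h : '\n' ∉ l) :
    PySem.Chars.stripChars l ['\n'] = l := by
  show (List.dropWhile (fun c => (['\n'] : List Char).contains c)
      (List.dropWhile (fun c => (['\n'] : List Char).contains c) l).reverse).reverse = l
  rw [pvDropWhile_no_nl l h, pvDropWhile_no_nl l.reverse (by simpa using h), List.reverse_reverse]

theorem pvSplitOn_no_sep (cur : List Char) (h : ' ' ∉ cur) : cur.splitOn ' ' = [cur] := by
  induction cur with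
  | nil => rfl
  | cons a t ih =>
    have ha : a ≠ ' ' := by intro hh; exact h (by simp [hh])
    have ht : ' ' ∉ t := fun hm => h (List.mem_cons_of_mem _ hm)
    show List.splitOnP (fun c => c == ' ') (a :: t) = [a :: t]
    rw [List.splitOnP_cons]
    simp only [beq_iff_eq, ha]
    rw [show List.splitOnP (fun c => c == ' ') t = [t] from ih ht]
    simp

theorem pvSplitOn_append (cur rest : List Char) (h : ' ' ∉ cur) :
    (cur ++ ' ' :: rest).splitOn ' ' = cur :: rest.splitOn ' ' := by
  induction cur with
  | nil =>
    show List.splitOnP (fun c => c == ' ') (' ' :: rest) = [] :: List.splitOnP (fun c => c == ' ') rest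
    rw [List.splitOnP_cons]; simp
  | cons a t ih =>
    have ha : a ≠ ' ' := by intro hh; exact h (by simp [hh])
    have ht : ' ' ∉ t := fun hm => h (List.mem_cons_of_mem _ hm)
    show List.splitOnP (fun c => c == ' ') (a :: (t ++ ' ' :: rest)) = (a :: t) :: rest.splitOn ' '
    rw [List.splitOnP_cons]
    simp only [beq_iff_eq, ha]
    rw [show List.splitOnP (fun c => c == ' ') (t ++ ' ' :: rest) = t :: rest.splitOn ' ' from ih ht]
    simp

-- B's tokenisation of an already-cleaned (punctuation-free, '\n'→' ') char list
def pvTok (l : List Char) : List String :=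
  ((l.splitOn ' ').map String.ofList).filter (fun p => p ≠ "")

theorem pvTok_no_sep (cur : List Char) (h : ' ' ∉ cur) :
    pvTok cur = if cur ≠ [] then [String.ofList cur] else [] := by
  unfold pvTok
  rw [pvSplitOn_no_sep cur h]
  by_cases hc : cur = []
  · subst hc; simp
  · have : (String.ofList cur ≠ "") := fun hh => hc ((pvOfList_eq_empty_iff cur).mp hh)
    simp [hc, this]

theorem pvTok_append (cur rest : List Char) (h : ' ' ∉ cur) :
    pvTok (cur ++ ' ' :: rest) = (if cur ≠ [] then [String.ofList cur] else []) ++ pvTok rest := by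
  unfold pvTok
  rw [pvSplitOn_append cur rest h]
  by_cases hc : cur = []
  · subst hc; simp
  · simp only [List.map_cons, List.filter_cons]
    have : (String.ofList cur ≠ "") := fun hh => hc ((pvOfList_eq_empty_iff cur).mp hh)
    simp [hc, this]

-- main loop invariant: A's loop from state (ws, cur) equals ws ++ B's tokenisation of
-- cur followed by the cleaned remainder (cur never contains ' ', '\n' or punctuation)
theorem pvMain (cs : List Char) (ws : List String) (cur : List Char)
    (hsp : ' ' ∉ cur) (hnl : '\n' ∉ cur) :
    pvFinishA (cs.foldl pvStepA (ws, cur))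
      = ws ++ pvTok (cur ++ (cs.filter (fun c => !pvPunct.contains c)).map
          (fun c => if c = '\n' then ' ' else c)) := by
  induction cs generalizing ws cur with
  | nil =>
    simp only [List.filter_nil, List.map_nil, List.append_nil, List.foldl_nil]
    rw [pvTok_no_sep cur hsp]
    unfold pvFinishA
    by_cases hc : cur = []
    · subst hc; simp
    · simp [hc, pvStrip_no_nl cur hnl]
  | cons c rest ih =>
    simp only [List.foldl_cons]
    by_cases h1 : c = ' ' ∨ c = '\n'
    · have hcl : c ∉ pvPunct := by
        rcases h1 with rfl | rfl <;> decide
      have hmap : (if c = '\n' then ' ' else c) = ' ' := by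
        rcases h1 with rfl | rfl <;> rfl
      by_cases hc : cur = []
      · subst hc
        rw [show pvStepA (ws, ([] : List Char)) c = (ws, []) from by
          rcases h1 with rfl | rfl <;> simp [pvStepA]]
        rw [ih ws [] (by simp) (by simp)]
        rw [show (c :: rest).filter (fun c => !pvPunct.contains c)
              = c :: rest.filter (fun c => !pvPunct.contains c) from by simp [hcl]]
        rw [List.map_cons, hmap]
        rw [pvTok_append [] _ (by simp)]
        simp
      · rw [show pvStepA (ws, cur) c = (ws ++ [String.ofList cur], []) from by
          rcases h1 with rfl | rfl <;> simp [pvStepA, hc]]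
        rw [ih (ws ++ [String.ofList cur]) [] (by simp) (by simp)]
        rw [show (c :: rest).filter (fun c => !pvPunct.contains c)
              = c :: rest.filter (fun c => !pvPunct.contains c) from by simp [hcl]]
        rw [List.map_cons, hmap]
        rw [pvTok_append cur _ hsp]
        simp [hc]
    · rw [not_or] at h1
      obtain ⟨hsp', hnl'⟩ := h1
      by_cases hp : c ∈ pvPunct
      · rw [show pvStepA (ws, cur) c = (ws, cur) from by
          simp [pvStepA, hsp', hnl', hp]]
        rw [ih ws cur hsp hnl]
        simp [hp]
      · rw [show pvStepA (ws, cur) c = (ws, cur ++ [c]) from by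
          simp [pvStepA, hsp', hnl', hp]]
        have hsp2 : ' ' ∉ cur ++ [c] := by
          intro h
          rcases List.mem_append.mp h with h | h
          · exact hsp h
          · exact hsp' (show ' ' = c by simpa using h).symm
        have hnl2 : '\n' ∉ cur ++ [c] := by
          intro h
          rcases List.mem_append.mp h with h | h
          · exact hnl h
          · exact hnl' (show '\n' = c by simpa using h).symm
        rw [ih ws (cur ++ [c]) hsp2 hnl2]
        have hmap : (if c = '\n' then ' ' else c) = c := by simp [hnl']
        simp [hp, hmap]

-- ===== VERDICT (by name: the statement is the Claim_ definition above) =====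
theorem separa_palavras_spec : Claim_equal_separa_palavras := by
  intro texto _
  unfold Spec_separa_palavras separa_palavras separa_palavras_alt
  rw [pvMain texto.toList [] [] (by simp) (by simp)]
  simp [pvTok]
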